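-- pv_equiv track=rewrite | github.com/mikeberl/advent-of-code-24 | day_10/10_1.py | trova_path_complete
-- ===== SOURCE A (Python) =====
-- def trova_path_complete(grid):
--     lines, cols = len(grid), len(grid[0])
--
--     direction = [(-1, 0), (1, 0), (0, 1), (0, -1)]
--
--     def valid(r, c):
--         return 0 <= r < lines and 0 <= c < cols
--
--     def find_path(start_r, start_c):
--         pos = {0: {(start_r, start_c)}}
--
--         end_points = set()
--
--         for key in range(9):
--             new_pos = set()
--
--             for r, c in pos[key]:
--                 for dir_l, dir_c in direction:
--                     new_line, new_col = r + dir_l, c + dir_c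
--
--                     if (valid(new_line, new_col) and
--                         grid[new_line][new_col] == str(key + 1)):
--                         new_pos.add((new_line, new_col))
--
--             if not new_pos:
--                 break
--
--             pos[key + 1] = new_pos
--
--             if key == 8:
--                 end_points.update(new_pos)
--
--         return len(end_points)
--
--     zeros = [(r, c) for r in range(lines) for c in range(cols) if grid[r][c] == '0']
--
--     path_sum = sum(find_path(r, c) for r, c in zeros)
--
--     return path_sum
-- ===== SOURCE B (Python) =====
-- def trova_path_complete(grid):
--     lines, cols = len(grid), len(grid[0])
--     reach = {}
--     for h in range(9, -1, -1):
--         t = str(h)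
--         nt = str(h + 1)
--         for r in range(lines):
--             for c in range(cols):
--                 if grid[r][c] == t:
--                     if h == 9:
--                         reach[(r, c)] = {(r, c)}
--                     else:
--                         s = set()
--                         for nr, nc in ((r - 1, c), (r + 1, c), (r, c + 1), (r, c - 1)):
--                             if 0 <= nr < lines and 0 <= nc < cols and grid[nr][nc] == nt:
--                                 s |= reach[(nr, nc)]
--                         reach[(r, c)] = s
--     return sum(len(reach[(r, c)])
--                for r in range(lines) for c in range(cols) if grid[r][c] == '0')
-- ===== Notes on version B (the rewrite author's own statement) =====
-- stated objective: alternative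
-- what changed: A runs a separate forward BFS (height 0 up to 9) from every '0' cell; B makes a single backward dynamic-programming sweep over the whole grid from height 9 down to 0, computing each cell's reachable-summit set once, and then just sums the set sizes at the '0' cells.
import Mathlib
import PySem

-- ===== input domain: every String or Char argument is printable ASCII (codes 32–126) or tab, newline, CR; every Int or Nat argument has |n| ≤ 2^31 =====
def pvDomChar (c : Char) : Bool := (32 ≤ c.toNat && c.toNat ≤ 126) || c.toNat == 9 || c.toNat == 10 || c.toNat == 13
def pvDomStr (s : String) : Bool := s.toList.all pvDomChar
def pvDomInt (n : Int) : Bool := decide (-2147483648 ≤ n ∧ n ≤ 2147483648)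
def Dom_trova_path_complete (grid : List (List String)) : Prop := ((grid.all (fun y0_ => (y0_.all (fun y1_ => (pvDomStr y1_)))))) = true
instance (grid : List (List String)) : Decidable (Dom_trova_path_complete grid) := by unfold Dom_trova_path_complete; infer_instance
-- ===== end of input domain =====

-- B replaces A's per-trailhead forward BFS by a single backward DP (height 9 → 0) that
-- propagates reachable-summit sets once over the whole grid; same return value, different algorithm.

-- ===== PORT A =====
-- grid[r][c] (total form; exact whenever the indices are in range, which Pre_ guarantees at every use)
def pvCell (grid : List (List String)) (r c : Int) : String :=
  PySem.List.pyGetD (PySem.List.pyGetD grid r []) c ""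

def tpcDirections : List (Int × Int) := [(-1, 0), (1, 0), (0, 1), (0, -1)]

-- `valid(r, c)`
def tpcValid (lines cols r c : Int) : Bool :=
  decide (0 ≤ r ∧ r < lines) && decide (0 ≤ c ∧ c < cols)

-- one iteration of `for key in range(9)` inside find_path (state: pos, end_points, broken?)
def tpcStep (grid : List (List String)) (lines cols : Int)
    (st : PySem.Dict Int (PySem.Set (Int × Int)) × PySem.Set (Int × Int) × Bool)
    (key : Int) :
    PySem.Dict Int (PySem.Set (Int × Int)) × PySem.Set (Int × Int) × Bool :=
  if st.2.2 then st else
  let new_pos : PySem.Set (Int × Int) :=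
    (st.1.getD key []).foldl (fun np rc =>
      tpcDirections.foldl (fun np d =>
        -- new_line = rc.1 + d.1, new_col = rc.2 + d.2 (inlined)
        if tpcValid lines cols (rc.1 + d.1) (rc.2 + d.2) &&
           (pvCell grid (rc.1 + d.1) (rc.2 + d.2) == PySem.Int.toStr (key + 1))
        then PySem.Set.add np (rc.1 + d.1, rc.2 + d.2) else np) np) PySem.Set.empty
  if new_pos.isEmpty then (st.1, st.2.1, true)
  else
    let pos := st.1.insert (key + 1) new_pos
    let end_points := if key == 8 then PySem.Set.update st.2.1 new_pos else st.2.1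
    (pos, end_points, st.2.2)

-- `find_path(start_r, start_c)`
def tpcFindPath (grid : List (List String)) (lines cols start_r start_c : Int) : Int :=
  -- pos = {0: {(start_r, start_c)}}, end_points = set(), broken? = false;
  -- loop over range(9); return len(end_points)
  (PySem.Set.len
    (((PySem.List.pyRange 0 9 1).foldl (tpcStep grid lines cols)
      (PySem.Dict.empty.insert 0 (PySem.Set.ofList [(start_r, start_c)]),
        (PySem.Set.empty : PySem.Set (Int × Int)), false)).2.1) : Int)

def trova_path_complete (grid : List (List String)) : Int :=
  let lines : Int := grid.length
  let cols : Int := (PySem.List.pyGetD grid 0 []).length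
  let zeros : List (Int × Int) :=
    (PySem.List.pyRange 0 lines 1).flatMap (fun r =>
      (PySem.List.pyRange 0 cols 1).filterMap (fun c =>
        if pvCell grid r c == "0" then some (r, c) else none))
  ((zeros.map (fun rc => tpcFindPath grid lines cols rc.1 rc.2)).sum)

-- ===== PORT B =====
-- the four neighbours ((r-1,c),(r+1,c),(r,c+1),(r,c-1)) of Source B
def tpcNbrs (rc : Int × Int) : List (Int × Int) :=
  [(rc.1 - 1, rc.2), (rc.1 + 1, rc.2), (rc.1, rc.2 + 1), (rc.1, rc.2 - 1)]

-- body of the `for c in range(cols)` loop of Source B at height h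
def tpcAltCell (grid : List (List String)) (lines cols h : Int)
    (reach : PySem.Dict (Int × Int) (PySem.Set (Int × Int))) (rc : Int × Int) :
    PySem.Dict (Int × Int) (PySem.Set (Int × Int)) :=
  if pvCell grid rc.1 rc.2 == PySem.Int.toStr h then
    if h == 9 then reach.insert rc (PySem.Set.ofList [rc])
    else
      let s : PySem.Set (Int × Int) :=
        (tpcNbrs rc).foldl (fun s nb =>
          if decide (0 ≤ nb.1 ∧ nb.1 < lines) && decide (0 ≤ nb.2 ∧ nb.2 < cols) &&
             (pvCell grid nb.1 nb.2 == PySem.Int.toStr (h + 1))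
          then PySem.Set.union s (reach.getD nb []) else s) PySem.Set.empty
      reach.insert rc s
  else reach

-- body of the `for h in range(9, -1, -1)` loop of Source B
def tpcAltLevel (grid : List (List String)) (lines cols : Int)
    (reach : PySem.Dict (Int × Int) (PySem.Set (Int × Int))) (h : Int) :
    PySem.Dict (Int × Int) (PySem.Set (Int × Int)) :=
  (PySem.List.pyRange 0 lines 1).foldl (fun reach r =>
    (PySem.List.pyRange 0 cols 1).foldl (fun reach c =>
      tpcAltCell grid lines cols h reach (r, c)) reach) reach

def trova_path_complete_alt (grid : List (List String)) : Int :=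
  let lines : Int := grid.length
  let cols : Int := (PySem.List.pyGetD grid 0 []).length
  let reach := (PySem.List.pyRange 9 (-1) (-1)).foldl (tpcAltLevel grid lines cols)
      PySem.Dict.empty
  (((PySem.List.pyRange 0 lines 1).flatMap (fun r =>
      (PySem.List.pyRange 0 cols 1).filterMap (fun c =>
        if pvCell grid r c == "0" then some ((PySem.Set.len (reach.getD (r, c) []) : Int))
        else none))).sum)

-- ===== PRECONDITION & SPEC =====
-- Pre_ excludes exactly the inputs where the Python A raises an IndexError:
-- the empty grid (len(grid[0])) and grids with a row shorter than row 0
-- (the zeros-comprehension indexes grid[r][c] for every c < len(grid[0])).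
def Pre_trova_path_complete (grid : List (List String)) : Prop :=
  grid ≠ [] ∧ ∀ row ∈ grid, (grid.headD []).length ≤ row.length
instance (grid : List (List String)) : Decidable (Pre_trova_path_complete grid) := by
  unfold Pre_trova_path_complete; infer_instance

def pvWitness_trova_path_complete : List (List String) :=
  [["0", "1"], ["1", "2"]]

def Spec_trova_path_complete (grid : List (List String)) (out : Int) : Prop := out = trova_path_complete_alt grid
instance (grid : List (List String)) (out : Int) : Decidable (Spec_trova_path_complete grid out) := by unfold Spec_trova_path_complete; infer_instance

-- ===== CLAIM (what is proved, stated in full; the proofs are below) =====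
def Claim_equal_trova_path_complete : Prop := ∀ (grid : List (List String)), Dom_trova_path_complete grid → Pre_trova_path_complete grid → Spec_trova_path_complete grid (trova_path_complete grid)

-- ===== LEMMAS AND PROOFS =====

-- in-bounds predicate (valid(r,c) of A, the bound checks of Source B)
def inBnds (lines cols : Int) (q : Int × Int) : Prop :=
  (0 ≤ q.1 ∧ q.1 < lines) ∧ (0 ≤ q.2 ∧ q.2 < cols)

-- one admissible step from m to q whose target carries the digit string of v
def stepOK (grid : List (List String)) (lines cols v : Int) (m q : Int × Int) : Prop :=
  q ∈ tpcDirections.map (fun d => (m.1 + d.1, m.2 + d.2)) ∧ inBnds lines cols q ∧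
    pvCell grid q.1 q.2 = PySem.Int.toStr v

-- suffix paths: from p (at height base) up to a height-9 cell q, checking heights base+1 .. 9
def sufP (grid : List (List String)) (lines cols : Int) :
    Nat → Int → (Int × Int) → (Int × Int) → Prop
  | 0, _, p, q => q = p
  | k+1, base, p, q => ∃ m, stepOK grid lines cols (base + 1) p m ∧
      sufP grid lines cols k (base + 1) m q

-- prefix paths: k steps from p starting at height 0 (heights 1 .. k), built back-to-front
def prefP (grid : List (List String)) (lines cols : Int) :
    Nat → (Int × Int) → (Int × Int) → Prop
  | 0, p, q => q = p
  | k+1, p, q => ∃ m, prefP grid lines cols k p m ∧ stepOK grid lines cols ((k : Int) + 1) m q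

lemma tpcNbrs_eq_map (m : Int × Int) :
    tpcNbrs m = tpcDirections.map (fun d => (m.1 + d.1, m.2 + d.2)) := by
  simp [tpcNbrs, tpcDirections, sub_eq_add_neg]

lemma tpc_toStr_ne : ∀ a b : Nat, a ≤ 10 → b ≤ 10 → a ≠ b →
    PySem.Int.toStr (a : Int) ≠ PySem.Int.toStr (b : Int) := by
  intro a b ha hb hne
  interval_cases a <;> interval_cases b <;> first | (exact absurd rfl hne) | decide

lemma tpcValid_iff (lines cols r c : Int) :
    tpcValid lines cols r c = true ↔ (0 ≤ r ∧ r < lines) ∧ (0 ≤ c ∧ c < cols) := by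
  simp [tpcValid]

lemma stepOK_iff (grid : List (List String)) (lines cols v : Int) (p x : Int × Int) :
    (∃ d ∈ tpcDirections,
        (tpcValid lines cols (p.1 + d.1) (p.2 + d.2) &&
          (pvCell grid (p.1 + d.1) (p.2 + d.2) == PySem.Int.toStr v)) = true ∧
        x = (p.1 + d.1, p.2 + d.2)) ↔ stepOK grid lines cols v p x := by
  unfold stepOK
  constructor
  · rintro ⟨d, hd, hc, rfl⟩
    rw [Bool.and_eq_true, beq_iff_eq] at hc
    exact ⟨List.mem_map.mpr ⟨d, hd, rfl⟩, (tpcValid_iff _ _ _ _).mp hc.1, hc.2⟩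
  · rintro ⟨hmem, hv, hcell⟩
    rcases List.mem_map.mp hmem with ⟨d, hd, rfl⟩
    exact ⟨d, hd, by rw [Bool.and_eq_true, beq_iff_eq]; exact ⟨(tpcValid_iff _ _ _ _).mpr hv, hcell⟩, rfl⟩

lemma altCond_iff (grid : List (List String)) (lines cols v : Int) (nb : Int × Int) :
    (decide (0 ≤ nb.1 ∧ nb.1 < lines) && decide (0 ≤ nb.2 ∧ nb.2 < cols) &&
      (pvCell grid nb.1 nb.2 == PySem.Int.toStr v)) = true ↔
    inBnds lines cols nb ∧ pvCell grid nb.1 nb.2 = PySem.Int.toStr v := by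
  simp [inBnds, and_assoc]

-- appending one step at the top of a suffix path
lemma suf_snoc (grid : List (List String)) (lines cols : Int) :
    ∀ (k : Nat) (b : Int) (p q : Int × Int),
      (∃ m, sufP grid lines cols k b p m ∧ stepOK grid lines cols (b + (k : Int) + 1) m q) ↔
      sufP grid lines cols (k + 1) b p q := by
  intro k
  induction k with
  | zero =>
    intro b p q
    simp only [sufP, Nat.cast_zero, add_zero]
    constructor
    · rintro ⟨m, rfl, h⟩; exact ⟨q, h, rfl⟩
    · rintro ⟨m, h, rfl⟩; exact ⟨p, rfl, h⟩
  | succ k ih =>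
    intro b p q
    constructor
    · rintro ⟨m, ⟨m', hstep, hsuf⟩, hlast⟩
      refine ⟨m', hstep, ?_⟩
      refine (ih (b + 1) m' q).mp ⟨m, hsuf, ?_⟩
      have : b + 1 + (k : Int) + 1 = b + ((k : Nat) + 1 : Nat) + 1 := by push_cast; ring
      rwa [this]
    · rintro ⟨m', hstep, hsuf⟩
      rcases (ih (b + 1) m' q).mpr hsuf with ⟨m, hsuf', hlast⟩
      refine ⟨m, ⟨m', hstep, hsuf'⟩, ?_⟩
      have : b + 1 + (k : Int) + 1 = b + ((k : Nat) + 1 : Nat) + 1 := by push_cast; ring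
      rwa [this] at hlast

lemma pref_eq_suf (grid : List (List String)) (lines cols : Int) :
    ∀ (k : Nat) (p q : Int × Int),
      prefP grid lines cols k p q ↔ sufP grid lines cols k 0 p q := by
  intro k
  induction k with
  | zero => intro p q; simp [prefP, sufP]
  | succ k ih =>
    intro p q
    simp only [prefP]
    rw [← suf_snoc grid lines cols k 0 p q]
    constructor
    · rintro ⟨m, hp, hs⟩
      exact ⟨m, (ih p m).mp hp, by simpa using hs⟩
    · rintro ⟨m, hp, hs⟩
      exact ⟨m, (ih p m).mpr hp, by simpa using hs⟩

-- membership / nodup through a conditional-add fold (A's new_pos inner loop shape)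
lemma mem_foldl_add_ite {β : Type} (l : List β) (c : β → Bool) (g : β → Int × Int) :
    ∀ (s : PySem.Set (Int × Int)) (x : Int × Int),
      x ∈ l.foldl (fun s b => if c b then PySem.Set.add s (g b) else s) s ↔
        x ∈ s ∨ ∃ b ∈ l, c b = true ∧ x = g b := by
  induction l with
  | nil => intro s x; simp
  | cons hd tl ih =>
    intro s x
    simp only [List.foldl_cons]
    rw [ih]
    by_cases h : c hd
    · simp only [h, if_pos, PySem.Set.mem_add, List.mem_cons]
      constructor
      · rintro (((hx | hx) | ⟨b, hb, hc, hx⟩))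
        · exact Or.inl hx
        · exact Or.inr ⟨hd, Or.inl rfl, h, hx⟩
        · exact Or.inr ⟨b, Or.inr hb, hc, hx⟩
      · rintro (hx | ⟨b, (rfl | hb), hc, hx⟩)
        · exact Or.inl (Or.inl hx)
        · exact Or.inl (Or.inr hx)
        · exact Or.inr ⟨b, hb, hc, hx⟩
    · simp only [h, if_neg, List.mem_cons, Bool.false_eq_true, false_and]
      constructor
      · rintro (hx | ⟨b, hb, hc, hx⟩)
        · exact Or.inl hx
        · exact Or.inr ⟨b, Or.inr hb, hc, hx⟩
      · rintro (hx | ⟨b, (rfl | hb), hc, hx⟩)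
        · exact Or.inl hx
        · exact absurd hc (by simp [h])
        · exact Or.inr ⟨b, hb, hc, hx⟩

lemma nodup_foldl_add_ite {β : Type} (l : List β) (c : β → Bool) (g : β → Int × Int) :
    ∀ (s : PySem.Set (Int × Int)), s.Nodup →
      (l.foldl (fun s b => if c b then PySem.Set.add s (g b) else s) s).Nodup := by
  induction l with
  | nil => intro s hs; simpa
  | cons hd tl ih =>
    intro s hs
    simp only [List.foldl_cons]
    refine ih _ ?_
    by_cases h : c hd
    · simpa [h] using PySem.Set.nodup_add s (g hd) hs
    · simpa [h]

-- membership / nodup through a conditional-union fold (Source B's neighbour loop shape)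
lemma mem_foldl_union_ite {β : Type} (l : List β) (c : β → Bool) (F : β → List (Int × Int)) :
    ∀ (s : PySem.Set (Int × Int)) (x : Int × Int),
      x ∈ l.foldl (fun s b => if c b then PySem.Set.union s (F b) else s) s ↔
        x ∈ s ∨ ∃ b ∈ l, c b = true ∧ x ∈ F b := by
  induction l with
  | nil => intro s x; simp
  | cons hd tl ih =>
    intro s x
    simp only [List.foldl_cons]
    rw [ih]
    by_cases h : c hd
    · simp only [h, if_pos, PySem.Set.mem_union, List.mem_cons]
      constructor
      · rintro (((hx | hx) | ⟨b, hb, hc, hx⟩))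
        · exact Or.inl hx
        · exact Or.inr ⟨hd, Or.inl rfl, h, hx⟩
        · exact Or.inr ⟨b, Or.inr hb, hc, hx⟩
      · rintro (hx | ⟨b, (rfl | hb), hc, hx⟩)
        · exact Or.inl (Or.inl hx)
        · exact Or.inl (Or.inr hx)
        · exact Or.inr ⟨b, hb, hc, hx⟩
    · simp only [h, if_neg, List.mem_cons, Bool.false_eq_true, false_and]
      constructor
      · rintro (hx | ⟨b, hb, hc, hx⟩)
        · exact Or.inl hx
        · exact Or.inr ⟨b, Or.inr hb, hc, hx⟩
      · rintro (hx | ⟨b, (rfl | hb), hc, hx⟩)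
        · exact Or.inl hx
        · exact absurd hc (by simp [h])
        · exact Or.inr ⟨b, hb, hc, hx⟩

lemma nodup_foldl_union_ite {β : Type} (l : List β) (c : β → Bool) (F : β → List (Int × Int)) :
    ∀ (s : PySem.Set (Int × Int)), s.Nodup →
      (l.foldl (fun s b => if c b then PySem.Set.union s (F b) else s) s).Nodup := by
  induction l with
  | nil => intro s hs; simpa
  | cons hd tl ih =>
    intro s hs
    simp only [List.foldl_cons]
    refine ih _ ?_
    by_cases h : c hd
    · simpa [h] using PySem.Set.nodup_union s (F hd) hs
    · simpa [h]

-- A's new_pos double fold: exactly the cells one admissible (key+1)-step beyond cur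
lemma A_newpos_mem (grid : List (List String)) (lines cols key : Int) :
    ∀ (cur s : PySem.Set (Int × Int)) (x : Int × Int),
      x ∈ cur.foldl (fun np rc => tpcDirections.foldl (fun np d =>
          if tpcValid lines cols (rc.1 + d.1) (rc.2 + d.2) &&
             (pvCell grid (rc.1 + d.1) (rc.2 + d.2) == PySem.Int.toStr (key + 1))
          then PySem.Set.add np (rc.1 + d.1, rc.2 + d.2) else np) np) s ↔
        x ∈ s ∨ ∃ p ∈ cur, stepOK grid lines cols (key + 1) p x := by
  intro cur
  induction cur with
  | nil => intro s x; simp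
  | cons p cur ih =>
    intro s x
    simp only [List.foldl_cons]
    rw [ih, mem_foldl_add_ite tpcDirections
      (fun d => tpcValid lines cols (p.1 + d.1) (p.2 + d.2) &&
        (pvCell grid (p.1 + d.1) (p.2 + d.2) == PySem.Int.toStr (key + 1)))
      (fun d => (p.1 + d.1, p.2 + d.2))]
    rw [stepOK_iff grid lines cols (key + 1) p x]
    simp only [List.mem_cons]
    constructor
    · rintro ((hx | hstep) | ⟨p', hp', hstep⟩)
      · exact Or.inl hx
      · exact Or.inr ⟨p, Or.inl rfl, hstep⟩
      · exact Or.inr ⟨p', Or.inr hp', hstep⟩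
    · rintro (hx | ⟨p', (rfl | hp'), hstep⟩)
      · exact Or.inl (Or.inl hx)
      · exact Or.inl (Or.inr hstep)
      · exact Or.inr ⟨p', hp', hstep⟩

lemma A_newpos_nodup (grid : List (List String)) (lines cols key : Int) :
    ∀ (cur s : PySem.Set (Int × Int)), s.Nodup →
      (cur.foldl (fun np rc => tpcDirections.foldl (fun np d =>
          if tpcValid lines cols (rc.1 + d.1) (rc.2 + d.2) &&
             (pvCell grid (rc.1 + d.1) (rc.2 + d.2) == PySem.Int.toStr (key + 1))
          then PySem.Set.add np (rc.1 + d.1, rc.2 + d.2) else np) np) s).Nodup := by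
  intro cur
  induction cur with
  | nil => intro s hs; simpa
  | cons p cur ih =>
    intro s hs
    simp only [List.foldl_cons]
    exact ih _ (nodup_foldl_add_ite tpcDirections _ _ s hs)

-- the loop invariant of A's find_path (state after the iterations key = 0 .. k-1)
def AInv (grid : List (List String)) (lines cols : Int) (start : Int × Int) (k : Nat)
    (st : PySem.Dict Int (PySem.Set (Int × Int)) × PySem.Set (Int × Int) × Bool) : Prop :=
  st.2.1 = [] ∧
  ((st.2.2 = false ∧ (st.1.getD (k : Int) []).Nodup ∧
      ∀ q, q ∈ st.1.getD (k : Int) [] ↔ prefP grid lines cols k start q) ∨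
   (st.2.2 = true ∧ ∀ q, ¬ prefP grid lines cols k start q))

lemma AInv_step (grid : List (List String)) (lines cols : Int) (start : Int × Int)
    (k : Nat) (hk : k ≤ 7)
    (st : PySem.Dict Int (PySem.Set (Int × Int)) × PySem.Set (Int × Int) × Bool)
    (h : AInv grid lines cols start k st) :
    AInv grid lines cols start (k + 1) (tpcStep grid lines cols st (k : Int)) := by
  obtain ⟨hep, hcases⟩ := h
  rcases hcases with ⟨hbr, hnd, hmem⟩ | ⟨hbr, hnone⟩
  · -- not broken
    unfold tpcStep
    rw [hbr]
    simp only [Bool.false_eq_true, if_false]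
    by_cases hemp : ((st.1.getD (k : Int) []).foldl (fun np rc =>
        tpcDirections.foldl (fun np d =>
          if tpcValid lines cols (rc.1 + d.1) (rc.2 + d.2) &&
             (pvCell grid (rc.1 + d.1) (rc.2 + d.2) == PySem.Int.toStr ((k : Int) + 1))
          then PySem.Set.add np (rc.1 + d.1, rc.2 + d.2) else np) np) PySem.Set.empty).isEmpty
    · rw [if_pos hemp]
      refine ⟨hep, Or.inr ⟨rfl, ?_⟩⟩
      intro q hq
      obtain ⟨m, hm, hstep⟩ := hq
      have : q ∈ ((st.1.getD (k : Int) []).foldl (fun np rc =>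
          tpcDirections.foldl (fun np d =>
            if tpcValid lines cols (rc.1 + d.1) (rc.2 + d.2) &&
               (pvCell grid (rc.1 + d.1) (rc.2 + d.2) == PySem.Int.toStr ((k : Int) + 1))
            then PySem.Set.add np (rc.1 + d.1, rc.2 + d.2) else np) np) PySem.Set.empty) := by
        rw [A_newpos_mem]
        exact Or.inr ⟨m, (hmem m).mpr hm, hstep⟩
      rw [List.isEmpty_iff] at hemp
      rw [hemp] at this
      simpa using this
    · rw [if_neg (by simpa using hemp)]
      have hk8 : (((k : Int)) == (8 : Int)) = false := by
        simp only [beq_eq_false_iff_ne, ne_eq]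
        intro hcon
        have : k = 8 := by exact_mod_cast hcon
        omega
      refine ⟨by simp [hk8, hep], Or.inl ⟨rfl, ?_, ?_⟩⟩
      · have hcast : ((k + 1 : Nat) : Int) = (k : Int) + 1 := by push_cast; ring
        rw [hcast, PySem.Dict.getD_insert_self]
        exact A_newpos_nodup grid lines cols ((k : Int)) _ _ (by simp [PySem.Set.empty])
      · intro q
        have hcast : ((k + 1 : Nat) : Int) = (k : Int) + 1 := by push_cast; ring
        rw [hcast, PySem.Dict.getD_insert_self, A_newpos_mem]
        simp only [PySem.Set.empty, List.not_mem_nil, false_or]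
        constructor
        · rintro ⟨p, hp, hstep⟩
          exact ⟨p, (hmem p).mp hp, hstep⟩
        · rintro ⟨p, hp, hstep⟩
          exact ⟨p, (hmem p).mpr hp, hstep⟩
  · -- broken: the step is the identity
    unfold tpcStep
    rw [hbr]
    simp only [if_pos]
    refine ⟨hep, Or.inr ⟨hbr, ?_⟩⟩
    rintro q ⟨m, hm, _⟩
    exact hnone m hm

lemma AInv_last (grid : List (List String)) (lines cols : Int) (start : Int × Int)
    (st : PySem.Dict Int (PySem.Set (Int × Int)) × PySem.Set (Int × Int) × Bool)
    (h : AInv grid lines cols start 8 st) :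
    (tpcStep grid lines cols st (8 : Int)).2.1.Nodup ∧
    ∀ q, q ∈ (tpcStep grid lines cols st (8 : Int)).2.1 ↔
      prefP grid lines cols 9 start q := by
  obtain ⟨hep, hcases⟩ := h
  have hcast8 : ((8 : Nat) : Int) = (8 : Int) := by norm_num
  rcases hcases with ⟨hbr, hnd, hmem⟩ | ⟨hbr, hnone⟩
  · unfold tpcStep
    rw [hbr]
    simp only [Bool.false_eq_true, if_false]
    rw [hcast8] at hnd hmem
    by_cases hemp : ((st.1.getD (8 : Int) []).foldl (fun np rc =>
        tpcDirections.foldl (fun np d =>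
          if tpcValid lines cols (rc.1 + d.1) (rc.2 + d.2) &&
             (pvCell grid (rc.1 + d.1) (rc.2 + d.2) == PySem.Int.toStr ((8 : Int) + 1))
          then PySem.Set.add np (rc.1 + d.1, rc.2 + d.2) else np) np) PySem.Set.empty).isEmpty
    · rw [if_pos hemp]
      refine ⟨by simp [hep], ?_⟩
      intro q
      simp only [hep, List.not_mem_nil, false_iff]
      rintro ⟨m, hm, hstep⟩
      have : q ∈ ((st.1.getD (8 : Int) []).foldl (fun np rc =>
          tpcDirections.foldl (fun np d =>
            if tpcValid lines cols (rc.1 + d.1) (rc.2 + d.2) &&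
               (pvCell grid (rc.1 + d.1) (rc.2 + d.2) == PySem.Int.toStr ((8 : Int) + 1))
            then PySem.Set.add np (rc.1 + d.1, rc.2 + d.2) else np) np) PySem.Set.empty) := by
        rw [A_newpos_mem]
        refine Or.inr ⟨m, (hmem m).mpr hm, ?_⟩
        rwa [hcast8] at hstep
      rw [List.isEmpty_iff] at hemp
      rw [hemp] at this
      simpa using this
    · rw [if_neg (by simpa using hemp)]
      simp only [beq_self_eq_true, if_pos, hep]
      constructor
      · exact PySem.Set.nodup_update [] _ (by simp)
      · intro q
        rw [PySem.Set.mem_update]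
        simp only [List.not_mem_nil, false_or]
        rw [A_newpos_mem]
        simp only [PySem.Set.empty, List.not_mem_nil, false_or]
        constructor
        · rintro ⟨p, hp, hstep⟩
          exact ⟨p, (hmem p).mp hp, by rwa [hcast8]⟩
        · rintro ⟨p, hp, hstep⟩
          exact ⟨p, (hmem p).mpr hp, by rwa [hcast8] at hstep⟩
  · unfold tpcStep
    rw [hbr]
    simp only [if_pos]
    refine ⟨by simp [hep], ?_⟩
    intro q
    simp only [hep, List.not_mem_nil, false_iff]
    rintro ⟨m, hm, _⟩
    exact hnone m hm

lemma AInv_zero (grid : List (List String)) (lines cols sr sc : Int) :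
    AInv grid lines cols (sr, sc) 0
      (PySem.Dict.empty.insert 0 (PySem.Set.ofList [(sr, sc)]),
        (PySem.Set.empty : PySem.Set (Int × Int)), false) := by
  refine ⟨rfl, Or.inl ⟨rfl, ?_, ?_⟩⟩
  · simp only [Nat.cast_zero, PySem.Dict.getD_insert_self]
    exact PySem.Set.nodup_ofList _
  · intro q
    simp only [Nat.cast_zero, PySem.Dict.getD_insert_self, PySem.Set.mem_ofList]
    simp [prefP]

lemma AInv_loop (grid : List (List String)) (lines cols sr sc : Int) :
    ∀ k : Nat, k ≤ 8 →
      AInv grid lines cols (sr, sc) k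
        ((PySem.List.pyRange 0 (k : Int) 1).foldl (tpcStep grid lines cols)
          (PySem.Dict.empty.insert 0 (PySem.Set.ofList [(sr, sc)]),
            (PySem.Set.empty : PySem.Set (Int × Int)), false)) := by
  intro k
  induction k with
  | zero =>
    intro _
    have e : PySem.List.pyRange (0 : Int) ((0 : Nat) : Int) 1 = [] := by decide
    rw [e]
    simpa using AInv_zero grid lines cols sr sc
  | succ k ih =>
    intro hk
    have hk' : k ≤ 7 := by omega
    have hcast : ((k + 1 : Nat) : Int) = (k : Int) + 1 := by push_cast; ring
    have e : PySem.List.pyRange (0 : Int) ((k + 1 : Nat) : Int) 1 =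
        PySem.List.pyRange (0 : Int) ((k : Nat) : Int) 1 ++ [((k : Nat) : Int)] := by
      rw [hcast]
      exact PySem.List.pyRange_one_succ_right (by positivity)
    rw [e, List.foldl_append, List.foldl_cons, List.foldl_nil]
    exact AInv_step grid lines cols (sr, sc) k hk' _ (ih (by omega))

-- a nodup list with the same members has the same Python set length
lemma setLen_eq {s t : List (Int × Int)} (hs : s.Nodup) (ht : t.Nodup)
    (h : ∀ x, x ∈ s ↔ x ∈ t) : PySem.Set.len s = PySem.Set.len t := by
  have hp := (List.perm_ext_iff_of_nodup hs ht).mpr h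
  simp [PySem.Set.len, hp.length_eq]

lemma findPath_eq (grid : List (List String)) (lines cols sr sc : Int)
    (R : List (Int × Int)) (hR : R.Nodup)
    (hmem : ∀ q, q ∈ R ↔ prefP grid lines cols 9 (sr, sc) q) :
    tpcFindPath grid lines cols sr sc = PySem.Set.len R := by
  unfold tpcFindPath
  have h9 : PySem.List.pyRange (0 : Int) 9 1 =
      PySem.List.pyRange (0 : Int) 8 1 ++ [(8 : Int)] := by decide
  rw [h9, List.foldl_append, List.foldl_cons, List.foldl_nil]
  have h8 := AInv_loop grid lines cols sr sc 8 (by norm_num)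
  rw [show (((8 : Nat)) : Int) = (8 : Int) by norm_num] at h8
  obtain ⟨hnd, hm⟩ := AInv_last grid lines cols (sr, sc) _ h8
  exact setLen_eq hnd hR (fun x => (hm x).trans ((hmem x).symm))

-- ===== B-side invariant =====

-- after levels 9 .. h have been processed, every in-bounds digit-j cell (h ≤ j ≤ 9)
-- holds exactly its reachable-summit set
def BInv (grid : List (List String)) (lines cols : Int) (h : Nat)
    (d : PySem.Dict (Int × Int) (PySem.Set (Int × Int))) : Prop :=
  ∀ p : Int × Int, ∀ j : Nat, h ≤ j → j ≤ 9 → inBnds lines cols p →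
    pvCell grid p.1 p.2 = PySem.Int.toStr (j : Int) →
    (d.getD p []).Nodup ∧
      ∀ q, q ∈ d.getD p [] ↔ sufP grid lines cols (9 - j) (j : Int) p q

-- the per-level spec of a single dict entry
def BSpec (grid : List (List String)) (lines cols : Int) (h : Nat)
    (d : PySem.Dict (Int × Int) (PySem.Set (Int × Int))) (x : Int × Int) : Prop :=
  (d.getD x []).Nodup ∧
    ∀ q, q ∈ d.getD x [] ↔ sufP grid lines cols (9 - h) (h : Int) x q

-- reads performed at level h (entries of digit h+1) stay valid
def BReads (grid : List (List String)) (lines cols : Int) (h : Nat)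
    (d : PySem.Dict (Int × Int) (PySem.Set (Int × Int))) : Prop :=
  h ≤ 8 → ∀ nb, inBnds lines cols nb →
    pvCell grid nb.1 nb.2 = PySem.Int.toStr ((h : Int) + 1) →
    (d.getD nb []).Nodup ∧
      ∀ q, q ∈ d.getD nb [] ↔ sufP grid lines cols (9 - (h + 1)) ((h : Int) + 1) nb q

lemma BCell_spec (grid : List (List String)) (lines cols : Int) (h : Nat) (hh : h ≤ 9)
    (d : PySem.Dict (Int × Int) (PySem.Set (Int × Int))) (hreads : BReads grid lines cols h d)
    (x : Int × Int) (hx : pvCell grid x.1 x.2 = PySem.Int.toStr ((h : Nat) : Int)) :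
    BSpec grid lines cols h (tpcAltCell grid lines cols ((h : Nat) : Int) d x) x := by
  unfold tpcAltCell
  rw [if_pos (by rw [beq_iff_eq]; exact hx)]
  by_cases h9 : h = 9
  · subst h9
    rw [if_pos (by norm_num)]
    constructor
    · rw [PySem.Dict.getD_insert_self]
      exact PySem.Set.nodup_ofList _
    · intro q
      rw [PySem.Dict.getD_insert_self, PySem.Set.mem_ofList]
      simp [sufP]
  · have hne9 : (((h : Nat) : Int) == (9 : Int)) = false := by
      simp only [beq_eq_false_iff_ne, ne_eq]
      intro hcon
      exact h9 (by exact_mod_cast hcon)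
    rw [if_neg (by simp [hne9])]
    have h8 : h ≤ 8 := by omega
    have hsub : 9 - h = (9 - (h + 1)) + 1 := by omega
    constructor
    · rw [PySem.Dict.getD_insert_self]
      exact nodup_foldl_union_ite (tpcNbrs x) _ _ _ (by simp [PySem.Set.empty])
    · intro q
      rw [PySem.Dict.getD_insert_self]
      rw [mem_foldl_union_ite (tpcNbrs x)
        (fun nb => decide (0 ≤ nb.1 ∧ nb.1 < lines) && decide (0 ≤ nb.2 ∧ nb.2 < cols) &&
          (pvCell grid nb.1 nb.2 == PySem.Int.toStr (((h : Nat) : Int) + 1)))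
        (fun nb => d.getD nb [])]
      simp only [PySem.Set.empty, List.not_mem_nil, false_or]
      rw [hsub]
      show _ ↔ sufP grid lines cols ((9 - (h+1)) + 1) ((h : Nat) : Int) x q
      simp only [sufP]
      constructor
      · rintro ⟨nb, hnb, hcond, hq⟩
        rw [altCond_iff] at hcond
        obtain ⟨hb, hcell⟩ := hcond
        refine ⟨nb, ?_, ?_⟩
        · exact ⟨by rw [← tpcNbrs_eq_map]; exact hnb, hb, hcell⟩
        · exact ((hreads h8 nb hb hcell).2 q).mp hq
      · rintro ⟨m, ⟨hmem', hb, hcell⟩, hsuf⟩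
        refine ⟨m, by rw [tpcNbrs_eq_map]; exact hmem', ?_, ?_⟩
        · rw [altCond_iff]; exact ⟨hb, hcell⟩
        · exact ((hreads h8 m hb hcell).2 q).mpr hsuf

lemma BCell_other (grid : List (List String)) (lines cols : Int) (h : Nat)
    (d : PySem.Dict (Int × Int) (PySem.Set (Int × Int))) (x y : Int × Int)
    (hy : pvCell grid y.1 y.2 ≠ PySem.Int.toStr ((h : Nat) : Int) ∨ y ≠ x) :
    (tpcAltCell grid lines cols ((h : Nat) : Int) d x).getD y [] = d.getD y [] := by
  unfold tpcAltCell
  by_cases hx : pvCell grid x.1 x.2 = PySem.Int.toStr ((h : Nat) : Int)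
  · rw [if_pos (by rw [beq_iff_eq]; exact hx)]
    have hyx : y ≠ x := by
      rcases hy with hcell | hne
      · intro hcon; exact hcell (by rw [hcon]; exact hx)
      · exact hne
    by_cases h9 : (((h : Nat) : Int) == (9 : Int)) = true
    · rw [if_pos h9]
      exact PySem.Dict.getD_insert_of_ne d _ _ hyx
    · rw [if_neg h9]
      exact PySem.Dict.getD_insert_of_ne d _ _ hyx
  · rw [if_neg (by rw [beq_iff_eq]; exact hx)]

lemma BCellFold (grid : List (List String)) (lines cols : Int) (h : Nat) (hh : h ≤ 9) :
    ∀ (L : List (Int × Int)) (d : PySem.Dict (Int × Int) (PySem.Set (Int × Int))),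
      BReads grid lines cols h d →
      (∀ y, pvCell grid y.1 y.2 ≠ PySem.Int.toStr ((h : Nat) : Int) →
        (L.foldl (tpcAltCell grid lines cols ((h : Nat) : Int)) d).getD y [] = d.getD y []) ∧
      (∀ y ∈ L, pvCell grid y.1 y.2 = PySem.Int.toStr ((h : Nat) : Int) →
        BSpec grid lines cols h (L.foldl (tpcAltCell grid lines cols ((h : Nat) : Int)) d) y) ∧
      (∀ y, pvCell grid y.1 y.2 = PySem.Int.toStr ((h : Nat) : Int) →
        BSpec grid lines cols h d y →
        BSpec grid lines cols h (L.foldl (tpcAltCell grid lines cols ((h : Nat) : Int)) d) y) := by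
  intro L
  induction L with
  | nil => intro d hreads; exact ⟨fun y _ => rfl, fun y hy => by simp at hy, fun y _ hs => hs⟩
  | cons x L ih =>
    intro d hreads
    simp only [List.foldl_cons]
    set d' := tpcAltCell grid lines cols ((h : Nat) : Int) d x with hd'
    have hreads' : BReads grid lines cols h d' := by
      intro h8 nb hb hcell
      have hne : pvCell grid nb.1 nb.2 ≠ PySem.Int.toStr ((h : Nat) : Int) := by
        rw [hcell]
        have := tpc_toStr_ne (h + 1) h (by omega) (by omega) (by omega)
        rw [show (((h + 1 : Nat)) : Int) = ((h : Nat) : Int) + 1 by push_cast; ring] at this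
        exact this
      rw [hd', BCell_other grid lines cols h d x nb (Or.inl hne)]
      exact hreads h8 nb hb hcell
    obtain ⟨c1, c2, c3⟩ := ih d' hreads'
    refine ⟨?_, ?_, ?_⟩
    · intro y hy
      rw [c1 y hy, hd', BCell_other grid lines cols h d x y (Or.inl hy)]
    · intro y hy hc
      rw [List.mem_cons] at hy
      rcases hy with rfl | hy
      · -- y = x : the freshly inserted entry satisfies the spec, and it is preserved
        exact c3 _ hc (BCell_spec grid lines cols h hh d hreads _ hc)
      · exact c2 y hy hc
    · intro y hc hs
      refine c3 y hc ?_
      by_cases hyx : y = x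
      · subst hyx
        exact BCell_spec grid lines cols h hh d hreads y hc
      · unfold BSpec
        rw [hd', BCell_other grid lines cols h d x y (Or.inr hyx)]
        exact hs

-- the flattened list of all in-bounds cells that the two nested loops of Source B visit
def cellList (lines cols : Int) : List (Int × Int) :=
  (PySem.List.pyRange 0 lines 1).flatMap (fun r =>
    (PySem.List.pyRange 0 cols 1).map (fun c => (r, c)))

lemma mem_cellList (lines cols : Int) (x : Int × Int) :
    x ∈ cellList lines cols ↔ inBnds lines cols x := by
  unfold cellList inBnds
  simp only [List.mem_flatMap, List.mem_map, PySem.List.mem_pyRange_one]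
  constructor
  · rintro ⟨r, hr, c, hc, rfl⟩
    exact ⟨hr, hc⟩
  · rintro ⟨h1, h2⟩
    exact ⟨x.1, h1, x.2, h2, rfl⟩

lemma tpcAltLevel_eq_fold (grid : List (List String)) (lines cols : Int)
    (d : PySem.Dict (Int × Int) (PySem.Set (Int × Int))) (h : Int) :
    tpcAltLevel grid lines cols d h =
      (cellList lines cols).foldl (tpcAltCell grid lines cols h) d := by
  unfold tpcAltLevel cellList
  rw [List.foldl_flatMap]
  simp only [List.foldl_map]

lemma BInv_level (grid : List (List String)) (lines cols : Int) (h : Nat) (hh : h ≤ 9)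
    (d : PySem.Dict (Int × Int) (PySem.Set (Int × Int)))
    (hd : BInv grid lines cols (h + 1) d) :
    BInv grid lines cols h (tpcAltLevel grid lines cols d ((h : Nat) : Int)) := by
  rw [tpcAltLevel_eq_fold]
  have hreads : BReads grid lines cols h d := by
    intro h8 nb hb hcell
    have := hd nb (h + 1) (le_refl _) (by omega) hb
      (by rwa [show (((h + 1 : Nat)) : Int) = ((h : Nat) : Int) + 1 by push_cast; ring])
    rw [show (((h + 1 : Nat)) : Int) = ((h : Nat) : Int) + 1 by push_cast; ring] at this
    exact this
  obtain ⟨c1, c2, _⟩ := BCellFold grid lines cols h hh (cellList lines cols) d hreads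
  intro p j hj hj9 hb hcell
  by_cases hjh : j = h
  · subst hjh
    exact c2 p ((mem_cellList lines cols p).mpr hb) hcell
  · have hj1 : h + 1 ≤ j := by omega
    have hne : pvCell grid p.1 p.2 ≠ PySem.Int.toStr ((h : Nat) : Int) := by
      rw [hcell]
      exact tpc_toStr_ne j h (by omega) (by omega) hjh
    rw [c1 p hne]
    exact hd p j hj1 hj9 hb hcell

lemma BInv_all (grid : List (List String)) (lines cols : Int) :
    BInv grid lines cols 0
      ((PySem.List.pyRange 9 (-1) (-1)).foldl (tpcAltLevel grid lines cols)
        PySem.Dict.empty) := by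
  have e : PySem.List.pyRange (9 : Int) (-1) (-1) = [9, 8, 7, 6, 5, 4, 3, 2, 1, 0] := by decide
  rw [e]
  simp only [List.foldl_cons, List.foldl_nil]
  have b10 : BInv grid lines cols 10 PySem.Dict.empty := by
    intro p j hj hj9 _ _
    exact absurd (hj.trans hj9) (by norm_num)
  have b9 := BInv_level grid lines cols 9 (by norm_num) _ b10
  rw [show (((9 : Nat)) : Int) = (9 : Int) by norm_num] at b9
  have b8 := BInv_level grid lines cols 8 (by norm_num) _ b9
  rw [show (((8 : Nat)) : Int) = (8 : Int) by norm_num] at b8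
  have b7 := BInv_level grid lines cols 7 (by norm_num) _ b8
  rw [show (((7 : Nat)) : Int) = (7 : Int) by norm_num] at b7
  have b6 := BInv_level grid lines cols 6 (by norm_num) _ b7
  rw [show (((6 : Nat)) : Int) = (6 : Int) by norm_num] at b6
  have b5 := BInv_level grid lines cols 5 (by norm_num) _ b6
  rw [show (((5 : Nat)) : Int) = (5 : Int) by norm_num] at b5
  have b4 := BInv_level grid lines cols 4 (by norm_num) _ b5
  rw [show (((4 : Nat)) : Int) = (4 : Int) by norm_num] at b4
  have b3 := BInv_level grid lines cols 3 (by norm_num) _ b4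
  rw [show (((3 : Nat)) : Int) = (3 : Int) by norm_num] at b3
  have b2 := BInv_level grid lines cols 2 (by norm_num) _ b3
  rw [show (((2 : Nat)) : Int) = (2 : Int) by norm_num] at b2
  have b1 := BInv_level grid lines cols 1 (by norm_num) _ b2
  rw [show (((1 : Nat)) : Int) = (1 : Int) by norm_num] at b1
  have b0 := BInv_level grid lines cols 0 (by norm_num) _ b1
  rw [show (((0 : Nat)) : Int) = (0 : Int) by norm_num] at b0
  exact b0

-- ===== VERDICT (by name: the statement is the Claim_ definition above) =====
theorem trova_path_complete_spec : Claim_equal_trova_path_complete := by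
  intro grid _hdom _hpre
  unfold Spec_trova_path_complete
  unfold trova_path_complete trova_path_complete_alt
  simp only []
  rw [List.map_flatMap]
  apply congrArg List.sum
  apply List.flatMap_congr
  intro r hr
  rw [List.map_filterMap]
  apply List.filterMap_congr
  intro c hc
  by_cases hcell : (pvCell grid r c == "0") = true
  · rw [if_pos hcell, if_pos hcell]
    simp only [Option.map_some]
    apply congrArg some
    rw [PySem.List.mem_pyRange_one] at hr hc
    have hb : inBnds (grid.length : Int) ((PySem.List.pyGetD grid 0 []).length : Int) (r, c) :=
      ⟨hr, hc⟩
    have hcell' : pvCell grid r c = PySem.Int.toStr ((0 : Nat) : Int) := by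
      rw [beq_iff_eq] at hcell
      rw [hcell]
      decide
    have hB := BInv_all grid (grid.length : Int) ((PySem.List.pyGetD grid 0 []).length : Int)
      (r, c) 0 (le_refl _) (by norm_num) hb hcell'
    obtain ⟨hnd, hm⟩ := hB
    refine findPath_eq grid _ _ r c _ hnd ?_
    intro q
    rw [hm q]
    rw [pref_eq_suf]
    norm_num
  · rw [if_neg hcell, if_neg hcell]
    rfl
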